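-- pv_equiv track=rewrite | github.com/AmDumDee/rossetacode | python/Boyer_Moore_string_search.py | good_suffix_table
-- ===== SOURCE A (Python) =====
-- from typing import List
--
-- def match_length(S: str, idx1: int, idx2: int) -> int:
--
--     if idx1 == idx2:
--         return len(S) - idx1
--     match_count = 0
--     while idx1 < len(S) and idx2 < len(S) and S[idx1] == S[idx2]:
--         match_count += 1
--         idx1 += 1
--         idx2 += 1
--     return match_count
--
-- def fundamental_preprocess(S: str) -> List[int]:
--
--     if len(S) == 0:
--         return []
--     if len(S) == 1:
--         return [1]
--     z = [0 for x in S]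
--     z[0] = len(S)
--     z[1] = match_length(S, 0, 1)
--     for i in range(2, 1 + z[1]):
--         z[i] = z[1] - i + 1
--
--     l = 0
--     r = 0
--     for i in range(2 + z[1], len(S)):
--         if i <= r:
--             k = i - l
--             b = z[k]
--             a = r - i + 1
--             if b < a:
--                 z[i] = b
--             else:
--                 z[i] = a + match_length(S, a, r + 1)
--                 l = i
--                 r = i + z[i] - 1
--         else:
--             z[i] = match_length(S, 0, i)
--             if z[i] > 0:
--                 l = i
--                 r = i + z[i] - 1
--     return z
--
-- def good_suffix_table(S: str) -> List[int]:
--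
--     L = [-1 for c in S]
--     N = fundamental_preprocess(S[::-1])
--     N.reverse()
--     for j in range(0, len(S) - 1):
--         i = len(S) - N[j]
--         if i != len(S):
--             L[i] = j
--     return L
-- ===== SOURCE B (Python) =====
-- def good_suffix_table(S: str) -> list:
--     m = len(S)
--     L = [-1] * m
--     for j in range(m - 1):
--         # length of the longest common suffix of S[:j+1] and S
--         t = 0
--         while t <= j and S[j - t] == S[m - 1 - t]:
--             t += 1
--         i = m - t
--         if i != m:
--             L[i] = j
--     return L
-- ===== Notes on version B (the rewrite author's own statement) =====
-- stated objective: simpler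
-- what changed: Replaced the linear-time Z-algorithm preprocessing of the reversed pattern (match_length + fundamental_preprocess with the l/r window optimization) by a direct naive backward character-comparison loop computing, for each j, the length of the longest common suffix of S[:j+1] and S.
import Mathlib
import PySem

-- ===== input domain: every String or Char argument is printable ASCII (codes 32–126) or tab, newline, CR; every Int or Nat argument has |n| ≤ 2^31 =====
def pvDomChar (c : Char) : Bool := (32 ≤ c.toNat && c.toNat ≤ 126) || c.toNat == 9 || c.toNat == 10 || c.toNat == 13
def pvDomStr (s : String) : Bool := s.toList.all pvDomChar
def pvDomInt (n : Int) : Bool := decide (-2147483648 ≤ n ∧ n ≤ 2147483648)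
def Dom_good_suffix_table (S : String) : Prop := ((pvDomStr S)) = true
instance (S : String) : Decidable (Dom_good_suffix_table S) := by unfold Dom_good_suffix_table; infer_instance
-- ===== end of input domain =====

-- B replaces the Z-algorithm (fundamental preprocessing of the reversed string) by a direct
-- backward character-comparison per position: simpler code, same exact table (objective: simpler).

-- ===== PORT A =====
-- while loop of match_length
def matchGo (s : List Char) (idx1 idx2 cnt : Int) : Int :=
  if h : idx1 < (s.length : Int) ∧ idx2 < (s.length : Int) ∧
      PySem.List.pyGet? s idx1 = PySem.List.pyGet? s idx2 then
    matchGo s (idx1 + 1) (idx2 + 1) (cnt + 1)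
  else cnt
termination_by ((s.length : Int) - idx1).toNat
decreasing_by omega

def matchLength (s : List Char) (idx1 idx2 : Int) : Int :=
  if idx1 = idx2 then (s.length : Int) - idx1
  else matchGo s idx1 idx2 0

-- body of the main loop of fundamental_preprocess; state (z, l, r)
def fpStep (s : List Char) (st : List Int × Int × Int) (i : Int) : List Int × Int × Int :=
  let z := st.1; let l := st.2.1; let r := st.2.2
  if i ≤ r then
    let k := i - l
    let b := (PySem.List.pyGet? z k).getD 0   -- z[k]; 0 ≤ k < len(z) always holds here, so exact
    let a := r - i + 1
    if b < a then (z.set i.toNat b, l, r)     -- z[i] = b; 0 ≤ i < len(z), so .set is exact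
    else
      let zi := a + matchLength s a (r + 1)
      (z.set i.toNat zi, i, i + zi - 1)
  else
    let zi := matchLength s 0 i
    if zi > 0 then (z.set i.toNat zi, i, i + zi - 1)
    else (z.set i.toNat zi, l, r)

def fundamentalPreprocess (s : List Char) : List Int :=
  if s.length = 0 then []
  else if s.length = 1 then [1]
  else
    let z  := (s.map (fun _ => (0 : Int))).set 0 (s.length : Int)
    let z1 := matchLength s 0 1
    let z  := z.set 1 z1
    let z  := (PySem.List.pyRange 2 (1 + z1) 1).foldl (fun z i => z.set i.toNat (z1 - i + 1)) z
    ((PySem.List.pyRange (2 + z1) (s.length : Int) 1).foldl (fpStep s) (z, 0, 0)).1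

def good_suffix_table (S : String) : List Int :=
  let s := S.toList
  let L := s.map (fun _ => (-1 : Int))
  let N := (fundamentalPreprocess s.reverse).reverse
  (PySem.List.pyRange 0 ((s.length : Int) - 1) 1).foldl
    (fun L j =>
      let i := (s.length : Int) - (PySem.List.pyGet? N j).getD 0   -- N[j]; in range, exact
      if i ≠ (s.length : Int) then L.set i.toNat j else L) L       -- L[i] = j; 0 ≤ i < len(L)

-- ===== PORT B =====
-- while t <= j and S[j-t] == S[m-1-t]: t += 1   (indices are in range whenever t ≤ j < m)
def suffGo (s : List Char) (j t : Nat) : Nat :=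
  if t ≤ j ∧ s[j - t]? = s[s.length - 1 - t]? then suffGo s j (t + 1) else t
termination_by j + 1 - t

def good_suffix_table_alt (S : String) : List Int :=
  let s := S.toList
  let m := s.length
  (PySem.List.pyRange 0 ((m : Int) - 1) 1).foldl
    (fun L j =>
      let t := suffGo s j.toNat 0
      let i := (m : Int) - (t : Int)
      if i ≠ (m : Int) then L.set i.toNat j else L)
    (List.replicate m (-1 : Int))

-- ===== PRECONDITION & SPEC =====
def Spec_good_suffix_table (S : String) (out : List Int) : Prop := out = good_suffix_table_alt S
instance (S : String) (out : List Int) : Decidable (Spec_good_suffix_table S out) := by unfold Spec_good_suffix_table; infer_instance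

-- ===== CLAIM (what is proved, stated in full; the proofs are below) =====
def Claim_equal_good_suffix_table : Prop := ∀ (S : String), Dom_good_suffix_table S → Spec_good_suffix_table S (good_suffix_table S)

-- ===== LEMMAS AND PROOFS =====
def cpl : List Char → List Char → Nat
  | a :: as, b :: bs => if a = b then cpl as bs + 1 else 0
  | _, _ => 0
def zf (s : List Char) (k : Nat) : Nat := cpl s (s.drop k)
def EA (s : List Char) (k t : Nat) : Prop := k + t < s.length ∧ s[t]? = s[k + t]?
def ZP (s : List Char) (k n : Nat) : Prop := (∀ t, t < n → EA s k t) ∧ ¬ EA s k n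

theorem ZP_unique {s : List Char} {k m n : Nat} (h1 : ZP s k m) (h2 : ZP s k n) : m = n := by
  rcases Nat.lt_trichotomy m n with h | h | h
  · exact absurd (h2.1 m h) h1.2
  · exact h
  · exact absurd (h1.1 n h) h2.2

theorem cpl_le (xs ys : List Char) : cpl xs ys ≤ ys.length := by
  induction xs generalizing ys with
  | nil => simp [cpl]
  | cons a as ih =>
    cases ys with
    | nil => simp [cpl]
    | cons b bs =>
      simp only [cpl]
      split_ifs with h
      · simpa using ih bs
      · simp

theorem cpl_lt (xs ys : List Char) :
    ∀ t, t < cpl xs ys → t < xs.length ∧ t < ys.length ∧ xs[t]? = ys[t]? := by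
  induction xs generalizing ys with
  | nil => simp [cpl]
  | cons a as ih =>
    cases ys with
    | nil => simp [cpl]
    | cons b bs =>
      intro t ht
      simp only [cpl] at ht
      split_ifs at ht with h
      · cases t with
        | zero => simpa [h] using Nat.zero_lt_succ _
        | succ t' =>
          have := ih bs t' (by omega)
          subst h
          simpa using this
      · omega

theorem cpl_stop (xs ys : List Char) :
    ¬ (cpl xs ys < xs.length ∧ cpl xs ys < ys.length ∧ xs[cpl xs ys]? = ys[cpl xs ys]?) := by
  induction xs generalizing ys with
  | nil => simp [cpl]
  | cons a as ih =>
    cases ys with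
    | nil => simp [cpl]
    | cons b bs =>
      simp only [cpl]
      split_ifs with h
      · intro hc
        exact ih bs ⟨by simpa using hc.1, by simpa using hc.2.1, by simpa using hc.2.2⟩
      · intro hc
        exact h (by simpa using hc.2.2)

theorem zf_ZP (s : List Char) (k : Nat) : ZP s k (zf s k) := by
  unfold zf
  have hdl : (s.drop k).length = s.length - k := by simp
  constructor
  · intro t ht
    obtain ⟨h1, h2, h3⟩ := cpl_lt s (s.drop k) t ht
    rw [hdl] at h2
    refine ⟨by omega, ?_⟩
    rw [← List.getElem?_drop]; exact h3
  · intro hc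
    obtain ⟨hc1, hc2⟩ := hc
    apply cpl_stop s (s.drop k)
    refine ⟨by omega, by rw [hdl]; omega, ?_⟩
    rw [List.getElem?_drop]; exact hc2

theorem zf_eq_of_ZP {s : List Char} {k n : Nat} (h : ZP s k n) : zf s k = n :=
  ZP_unique (zf_ZP s k) h

theorem zf_le (s : List Char) (k : Nat) : zf s k ≤ s.length - k := by
  have := cpl_le s (s.drop k)
  simpa [zf] using this
theorem matchGo_eq (s : List Char) : ∀ (n : Nat) (i1 i2 c : Int), 0 ≤ i1 → 0 ≤ i2 →
    s.length - i1.toNat ≤ n →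
    matchGo s i1 i2 c = c + (cpl (s.drop i1.toNat) (s.drop i2.toNat) : Int) := by
  intro n
  induction n with
  | zero =>
    intro i1 i2 c h1 h2 hn
    rw [matchGo]
    have hge : (s.length : Int) ≤ i1 := by omega
    rw [dif_neg (by omega)]
    have : s.drop i1.toNat = [] := List.drop_eq_nil_of_le (by omega)
    rw [this]
    cases s.drop i2.toNat <;> simp [cpl]
  | succ n ih =>
    intro i1 i2 c h1 h2 hn
    rw [matchGo]
    by_cases hcond : i1 < (s.length : Int) ∧ i2 < (s.length : Int) ∧
        PySem.List.pyGet? s i1 = PySem.List.pyGet? s i2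
    · rw [dif_pos hcond]
      obtain ⟨hl1, hl2, heq⟩ := hcond
      have h1n : i1.toNat < s.length := by omega
      have h2n : i2.toNat < s.length := by omega
      rw [ih (i1+1) (i2+1) (c+1) (by omega) (by omega) (by omega)]
      have hd1 : s.drop i1.toNat = s[i1.toNat] :: s.drop (i1.toNat + 1) :=
        List.drop_eq_getElem_cons h1n
      have hd2 : s.drop i2.toNat = s[i2.toNat] :: s.drop (i2.toNat + 1) :=
        List.drop_eq_getElem_cons h2n
      have hch : s[i1.toNat] = s[i2.toNat] := by
        rw [PySem.List.pyGet?_of_nonneg _ h1, PySem.List.pyGet?_of_nonneg _ h2] at heq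
        simpa [h1n, h2n] using heq
      rw [hd1, hd2]
      simp only [cpl, if_pos hch]
      have e1 : (i1 + 1).toNat = i1.toNat + 1 := by omega
      have e2 : (i2 + 1).toNat = i2.toNat + 1 := by omega
      rw [e1, e2]
      push_cast
      ring
    · rw [dif_neg hcond]
      -- loop stops: cpl of the drops is 0
      by_cases hl1 : i1 < (s.length : Int)
      · by_cases hl2 : i2 < (s.length : Int)
        · have hne : PySem.List.pyGet? s i1 ≠ PySem.List.pyGet? s i2 := by tauto
          have h1n : i1.toNat < s.length := by omega
          have h2n : i2.toNat < s.length := by omega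
          rw [List.drop_eq_getElem_cons h1n, List.drop_eq_getElem_cons h2n]
          have hch : s[i1.toNat] ≠ s[i2.toNat] := by
            intro hc; apply hne
            rw [PySem.List.pyGet?_of_nonneg _ h1, PySem.List.pyGet?_of_nonneg _ h2]
            simp [h1n, h2n, hc]
          simp [cpl, hch]
        · have : s.drop i2.toNat = [] := List.drop_eq_nil_of_le (by omega)
          rw [this]
          cases s.drop i1.toNat <;> simp [cpl]
      · have : s.drop i1.toNat = [] := List.drop_eq_nil_of_le (by omega)
        rw [this]
        cases s.drop i2.toNat <;> simp [cpl]

theorem matchLength_eq (s : List Char) (i1 i2 : Int) (h0 : 0 ≤ i1) (h0' : 0 ≤ i2)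
    (hne : i1 ≠ i2) : matchLength s i1 i2 = (cpl (s.drop i1.toNat) (s.drop i2.toNat) : Int) := by
  rw [matchLength, if_neg hne, matchGo_eq s (s.length - i1.toNat) i1 i2 0 h0 h0' le_rfl]
  ring

theorem pyRange_foldl_inv {σ : Type} (P : Int → σ → Prop) (f : σ → Int → σ) (b : Int) :
    ∀ (n : Nat) (a : Int) (st : σ), (b - a).toNat = n → P a st →
    (∀ i st', a ≤ i → i < b → P i st' → P (i + 1) (f st' i)) →
    P (max a b) ((PySem.List.pyRange a b 1).foldl f st) := by
  intro n
  induction n with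
  | zero =>
    intro a st hn h0 _
    rw [PySem.List.pyRange_one_eq_nil (by omega), List.foldl_nil, max_eq_left (by omega)]
    exact h0
  | succ n ih =>
    intro a st hn h0 hstep
    have hab : a < b := by omega
    rw [PySem.List.pyRange_one_cons hab, List.foldl_cons]
    have := ih (a + 1) (f st a) (by omega)
      (hstep a st le_rfl hab h0)
      (fun i st' hi hib hp => hstep i st' (by omega) hib hp)
    rw [max_eq_right (by omega : a ≤ b)]
    rwa [max_eq_right (by omega : a + 1 ≤ b)] at this
theorem foldl_set_getElem? (g : Int → Int) :
    ∀ (n : Nat) (a b : Int) (z : List Int), 0 ≤ a → (b - a).toNat = n →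
    (((PySem.List.pyRange a b 1).foldl (fun z i => z.set i.toNat (g i)) z).length = z.length ∧
     ∀ k : Nat, (((a ≤ (k : Int) ∧ (k : Int) < b) → k < z.length →
        ((PySem.List.pyRange a b 1).foldl (fun z i => z.set i.toNat (g i)) z)[k]? = some (g k)) ∧
      (¬ (a ≤ (k : Int) ∧ (k : Int) < b) →
        ((PySem.List.pyRange a b 1).foldl (fun z i => z.set i.toNat (g i)) z)[k]? = z[k]?))) := by
  intro n
  induction n with
  | zero =>
    intro a b z ha hn
    rw [PySem.List.pyRange_one_eq_nil (by omega)]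
    refine ⟨rfl, fun k => ⟨fun hk _ => absurd hk (by omega), fun _ => rfl⟩⟩
  | succ n ih =>
    intro a b z ha hn
    have hab : a < b := by omega
    rw [PySem.List.pyRange_one_cons hab, List.foldl_cons]
    obtain ⟨ihl, ihk⟩ := ih (a + 1) b (z.set a.toNat (g a)) (by omega) (by omega)
    refine ⟨by rw [ihl]; simp, fun k => ⟨?_, ?_⟩⟩
    · intro hk hkz
      by_cases hka : (k : Int) = a
      · have hkn : k = a.toNat := by omega
        rw [(ihk k).2 (by omega)]
        subst hkn
        rw [List.getElem?_set_self (by simpa using hkz)]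
        congr 1
        congr 1
        omega
      · rw [(ihk k).1 ⟨by omega, hk.2⟩ (by simpa using hkz)]
    · intro hk
      rw [(ihk k).2 (by omega), List.getElem?_set_ne (by omega)]

theorem zf_const (s : List Char) : ∀ u, u ≤ zf s 1 → u < s.length → s[u]? = s[0]? := by
  intro u
  induction u with
  | zero => intro _ _; rfl
  | succ u ih =>
    intro hu hul
    have hEA := (zf_ZP s 1).1 u (by omega)
    rw [show u + 1 = 1 + u by omega, ← hEA.2, ih (by omega) (by omega)]

theorem zf_run (s : List Char) (k : Nat) (h1 : 1 ≤ k) (hk : k ≤ zf s 1) :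
    zf s k = zf s 1 - k + 1 := by
  have hz1 := zf_ZP s 1
  have hlen : zf s 1 < s.length := by
    have := (hz1.1 (zf s 1 - 1) (by omega)).1
    omega
  apply zf_eq_of_ZP
  constructor
  · intro t ht
    refine ⟨by omega, ?_⟩
    rw [zf_const s t (by omega) (by omega), zf_const s (k + t) (by omega) (by omega)]
  · intro hEA
    obtain ⟨hb, he⟩ := hEA
    have hkn : k + (zf s 1 - k + 1) = zf s 1 + 1 := by omega
    rw [hkn] at hb he
    have hstop := hz1.2
    apply hstop
    refine ⟨by omega, ?_⟩
    rw [zf_const s (zf s 1) le_rfl (by omega), show 1 + zf s 1 = zf s 1 + 1 by omega, ← he,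
      zf_const s (zf s 1 - k + 1) (by omega) (by omega)]

theorem zf_after (s : List Char) (h : zf s 1 + 1 < s.length) : zf s (zf s 1 + 1) = 0 := by
  apply zf_eq_of_ZP
  refine ⟨fun t ht => absurd ht (by omega), ?_⟩
  intro hEA
  obtain ⟨hb, he⟩ := hEA
  apply (zf_ZP s 1).2
  refine ⟨by omega, ?_⟩
  rw [zf_const s (zf s 1) le_rfl (by omega), show 1 + zf s 1 = zf s 1 + 1 + 0 by omega]
  exact he
theorem zf_shift_lt (s : List Char) (p k : Nat) (hk1 : 1 ≤ k)
    (hklt : k + zf s k < zf s p) : zf s (p + k) = zf s k := by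
  have hzp := zf_ZP s p
  have hzk := zf_ZP s k
  apply zf_eq_of_ZP
  constructor
  · intro t ht
    obtain ⟨hkt1, hkt2⟩ := hzk.1 t ht
    obtain ⟨hpt1, hpt2⟩ := hzp.1 (k + t) (by omega)
    refine ⟨by omega, ?_⟩
    rw [hkt2, hpt2, Nat.add_assoc]
  · intro hEA
    obtain ⟨hb, he⟩ := hEA
    set n := zf s k with hn
    obtain ⟨hpt1, hpt2⟩ := hzp.1 (k + n) (by omega)
    apply hzk.2
    refine ⟨by omega, ?_⟩
    rw [he, Nat.add_assoc, ← hpt2]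

theorem zf_shift_ge (s : List Char) (p k : Nat) (hk1 : 1 ≤ k) (hkp : k < zf s p)
    (hge : zf s p - k ≤ zf s k) :
    zf s (p + k) = (zf s p - k) + cpl (s.drop (zf s p - k)) (s.drop (p + zf s p)) := by
  have hzp := zf_ZP s p
  have hzk := zf_ZP s k
  set a := zf s p - k with ha
  set e := p + zf s p with he'
  set M := cpl (s.drop a) (s.drop e) with hM
  have hda : (s.drop a).length = s.length - a := by simp
  have hde : (s.drop e).length = s.length - e := by simp
  apply zf_eq_of_ZP
  constructor
  · intro t ht
    by_cases hta : t < a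
    · obtain ⟨hkt1, hkt2⟩ := hzk.1 t (by omega)
      obtain ⟨hpt1, hpt2⟩ := hzp.1 (k + t) (by omega)
      refine ⟨by omega, ?_⟩
      rw [hkt2, hpt2, Nat.add_assoc]
    · have hu : t = a + (t - a) := by omega
      set u := t - a with hu'
      obtain ⟨hc1, hc2, hc3⟩ := cpl_lt (s.drop a) (s.drop e) u (by omega)
      rw [hde] at hc2
      rw [List.getElem?_drop, List.getElem?_drop] at hc3
      refine ⟨by omega, ?_⟩
      have h1 : p + k + t = e + u := by omega
      have h2 : t = a + u := by omega
      rw [h1, h2]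
      exact hc3
  · intro hEA
    obtain ⟨hb, hee⟩ := hEA
    have hidx : p + k + (a + M) = e + M := by omega
    rw [hidx] at hb hee
    apply cpl_stop (s.drop a) (s.drop e)
    rw [hda, hde, ← hM]
    refine ⟨by omega, by omega, ?_⟩
    rw [List.getElem?_drop, List.getElem?_drop, ← hee]
def ZInv (s : List Char) (i : Int) (st : List Int × Int × Int) : Prop :=
  st.1.length = s.length ∧
  (∀ k : Nat, 1 ≤ k → (k : Int) < i → k < s.length → st.1[k]? = some (zf s k : Int)) ∧
  ((st.2.1 = 0 ∧ st.2.2 = 0) ∨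
   (1 ≤ st.2.1 ∧ st.2.1 < i ∧ st.2.1 < (s.length : Int) ∧ 1 ≤ zf s st.2.1.toNat ∧
    st.2.2 = st.2.1 + (zf s st.2.1.toNat : Int) - 1))

theorem fpStep_inv (s : List Char) (i : Int) (st : List Int × Int × Int)
    (h2 : 2 ≤ i) (him : i < (s.length : Int)) (hinv : ZInv s i st) :
    ZInv s (i + 1) (fpStep s st i) := by
  obtain ⟨z, l, r⟩ := st
  obtain ⟨hlen, hz, hlr⟩ := hinv
  simp only at hlen hz hlr
  have hiN : ((i.toNat : Int)) = i := by omega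
  have hiNm : i.toNat < s.length := by omega
  have hiz : i.toNat < z.length := by omega
  simp only [fpStep, ZInv]
  split_ifs with hir hba hzi
  all_goals simp only
  · -- i ≤ r, b < a
    rcases hlr with ⟨hl0, hr0⟩ | ⟨hl1, hli, hlm, hzl1, hr⟩
    · omega
    set p := l.toNat with hp
    have hlN : ((p : Int)) = l := by omega
    set kn := (i - l).toNat with hkn
    have hknN : ((kn : Int)) = i - l := by omega
    have hkn1 : 1 ≤ kn := by omega
    have hknm : kn < s.length := by omega
    have hzk : PySem.List.pyGet? z (i - l) = some (zf s kn : Int) := by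
      rw [PySem.List.pyGet?_of_nonneg _ (by omega), ← hkn]
      exact hz kn hkn1 (by omega) hknm
    rw [hzk] at hba ⊢
    simp only [Option.getD_some] at hba ⊢
    -- b < a gives kn + zf s kn < zf s p
    have hshift : kn + zf s kn < zf s p := by
      have : (zf s kn : Int) < r - i + 1 := hba
      omega
    have hzeq : zf s (p + kn) = zf s kn := zf_shift_lt s p kn hkn1 hshift
    have hpkn : p + kn = i.toNat := by omega
    rw [hpkn] at hzeq
    refine ⟨by simpa using hlen, ?_, ?_⟩
    · intro k' hk1 hki hkm
      by_cases hk : k' = i.toNat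
      · subst hk
        rw [List.getElem?_set_self hiz, hzeq]
      · rw [List.getElem?_set_ne (by omega)]
        exact hz k' hk1 (by omega) hkm
    · right; exact ⟨hl1, by omega, hlm, hzl1, hr⟩
  · -- i ≤ r, b ≥ a
    rcases hlr with ⟨hl0, hr0⟩ | ⟨hl1, hli, hlm, hzl1, hr⟩
    · omega
    set p := l.toNat with hp
    have hlN : ((p : Int)) = l := by omega
    set kn := (i - l).toNat with hkn
    have hknN : ((kn : Int)) = i - l := by omega
    have hkn1 : 1 ≤ kn := by omega
    have hknm : kn < s.length := by omega
    have hzk : PySem.List.pyGet? z (i - l) = some (zf s kn : Int) := by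
      rw [PySem.List.pyGet?_of_nonneg _ (by omega), ← hkn]
      exact hz kn hkn1 (by omega) hknm
    rw [hzk] at hba
    simp only [Option.getD_some] at hba
    rw [not_lt] at hba
    -- a ≥ 1 and kn < zf s p
    have hknzl : kn < zf s p := by
      have : r - i + 1 ≤ (zf s kn : Int) := hba
      have hzfle := zf_le s kn
      omega
    have hge : zf s p - kn ≤ zf s kn := by
      have : r - i + 1 ≤ (zf s kn : Int) := hba
      omega
    have hml : matchLength s (r - i + 1) (r + 1) =
        (cpl (s.drop (zf s p - kn)) (s.drop (p + zf s p)) : Int) := by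
      have e1 : (r - i + 1).toNat = zf s p - kn := by omega
      have e2 : (r + 1).toNat = p + zf s p := by omega
      rw [matchLength_eq s _ _ (by omega) (by omega) (by omega), e1, e2]
    have hzeq : zf s (p + kn) = (zf s p - kn) + cpl (s.drop (zf s p - kn)) (s.drop (p + zf s p)) :=
      zf_shift_ge s p kn hkn1 hknzl hge
    have hpkn : p + kn = i.toNat := by omega
    rw [hpkn] at hzeq
    have hzi' : r - i + 1 + matchLength s (r - i + 1) (r + 1) = ((zf s i.toNat : Int)) := by
      rw [hml, hzeq]
      push_cast
      omega
    refine ⟨by simpa using hlen, ?_, ?_⟩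
    · intro k' hk1 hki hkm
      by_cases hk : k' = i.toNat
      · subst hk
        rw [List.getElem?_set_self hiz, hzi']
      · rw [List.getElem?_set_ne (by omega)]
        exact hz k' hk1 (by omega) hkm
    · right
      refine ⟨by omega, by omega, him, ?_, ?_⟩
      · have hcast := hzi'
        have : 1 ≤ r - i + 1 + matchLength s (r - i + 1) (r + 1) := by
          rw [hml]; omega
        omega
      · rw [← hzi']
  · -- i > r, zi > 0
    have hml : matchLength s 0 i = ((zf s i.toNat : Int)) := by
      rw [matchLength_eq s 0 i le_rfl (by omega) (by omega)]
      simp [zf]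
    rw [hml] at hzi ⊢
    refine ⟨by simpa using hlen, ?_, ?_⟩
    · intro k' hk1 hki hkm
      by_cases hk : k' = i.toNat
      · subst hk
        rw [List.getElem?_set_self hiz]
      · rw [List.getElem?_set_ne (by omega)]
        exact hz k' hk1 (by omega) hkm
    · right
      exact ⟨by omega, by omega, him, by exact_mod_cast hzi, rfl⟩
  · -- i > r, zi = 0
    have hml : matchLength s 0 i = ((zf s i.toNat : Int)) := by
      rw [matchLength_eq s 0 i le_rfl (by omega) (by omega)]
      simp [zf]
    rw [hml] at hzi ⊢
    refine ⟨by simpa using hlen, ?_, ?_⟩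
    · intro k' hk1 hki hkm
      by_cases hk : k' = i.toNat
      · subst hk
        rw [List.getElem?_set_self hiz]
      · rw [List.getElem?_set_ne (by omega)]
        exact hz k' hk1 (by omega) hkm
    · rcases hlr with ⟨hl0, hr0⟩ | ⟨hl1, hli, hlm, hzl1, hr⟩
      · left; exact ⟨hl0, hr0⟩
      · right; exact ⟨hl1, by omega, hlm, hzl1, hr⟩
theorem fp_correct (s : List Char) :
    (fundamentalPreprocess s).length = s.length ∧
    ∀ k : Nat, 1 ≤ k → k < s.length →
      (fundamentalPreprocess s)[k]? = some (zf s k : Int) := by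
  by_cases h0 : s.length = 0
  · rw [fundamentalPreprocess, if_pos h0]
    exact ⟨by simp [h0], fun k hk1 hkm => by omega⟩
  by_cases h1 : s.length = 1
  · rw [fundamentalPreprocess, if_neg h0, if_pos h1]
    exact ⟨by simp [h1], fun k hk1 hkm => by omega⟩
  have hm2 : 2 ≤ s.length := by omega
  rw [fundamentalPreprocess, if_neg h0, if_neg h1]
  simp only
  have hz1 : matchLength s 0 1 = (zf s 1 : Int) := by
    rw [matchLength_eq s 0 1 le_rfl (by omega) (by omega)]
    simp [zf]
  rw [hz1]
  set z1 := zf s 1 with hz1'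
  have hz1m : z1 < s.length := by have := zf_le s 1; omega
  set zbase := ((s.map fun _ => (0:Int)).set 0 ((s.length:Int))).set 1 ((z1:Int)) with hzb
  have hzbl : zbase.length = s.length := by simp [hzb]
  have hzb1 : zbase[1]? = some ((z1:Int)) := by
    rw [hzb, List.getElem?_set_self (by simp; omega)]
  have hzbk : ∀ k : Nat, 2 ≤ k → k < s.length → zbase[k]? = some 0 := by
    intro k hk2 hkm
    rw [hzb, List.getElem?_set_ne (by omega), List.getElem?_set_ne (by omega),
      List.getElem?_map]
    simp [hkm]
  obtain ⟨hfl, hfk⟩ := foldl_set_getElem? (fun i => (z1:Int) - i + 1)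
    ((1 + (z1:Int) - 2).toNat) 2 (1 + (z1:Int)) zbase (by omega) rfl
  set zrun := (PySem.List.pyRange 2 (1 + (z1:Int)) 1).foldl
    (fun z i => z.set i.toNat ((z1:Int) - i + 1)) zbase with hzr
  have hinit : ZInv s (2 + (z1:Int)) (zrun, 0, 0) := by
    refine ⟨by rw [hfl, hzbl], ?_, Or.inl ⟨rfl, rfl⟩⟩
    intro k hk1 hki hkm
    simp only
    by_cases hk2 : 2 ≤ k ∧ k ≤ z1
    · rw [(hfk k).1 ⟨by omega, by omega⟩ (by omega)]
      rw [zf_run s k (by omega) hk2.2]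
      congr 1
      omega
    · by_cases hke : k = 1
      · subst hke
        rw [(hfk 1).2 (by omega), hzb1]
    -- otherwise k = z1 + 1
      · have hkz : k = z1 + 1 := by omega
        rw [(hfk k).2 (by omega), hzbk k (by omega) hkm, hkz,
          zf_after s (by omega)]
        simp
  have hmain := pyRange_foldl_inv (ZInv s) (fpStep s) ((s.length:Int))
    (((s.length:Int) - (2 + (z1:Int))).toNat) (2 + (z1:Int)) (zrun, 0, 0) rfl hinit
    (fun i st' hi hib hp => fpStep_inv s i st' (by omega) hib hp)
  obtain ⟨hl, hk, _⟩ := hmain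
  refine ⟨hl, ?_⟩
  intro k hk1 hkm
  exact hk k hk1 (by omega) hkm

theorem suff_cond_iff (s : List Char) (j t : Nat) (hj : j + 2 ≤ s.length) :
    (t ≤ j ∧ s[j - t]? = s[s.length - 1 - t]?) ↔ EA s.reverse (s.length - 1 - j) t := by
  unfold EA
  rw [List.length_reverse]
  constructor
  · rintro ⟨htj, hch⟩
    refine ⟨by omega, ?_⟩
    rw [List.getElem?_reverse (by omega), List.getElem?_reverse (by omega),
      show s.length - 1 - (s.length - 1 - j + t) = j - t by omega]
    exact hch.symm
  · rintro ⟨hb, he⟩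
    have htj : t ≤ j := by omega
    refine ⟨htj, ?_⟩
    rw [List.getElem?_reverse (by omega), List.getElem?_reverse (by omega),
      show s.length - 1 - (s.length - 1 - j + t) = j - t by omega] at he
    exact he.symm

theorem suffGo_ZP (s : List Char) (j : Nat) (hj : j + 2 ≤ s.length) :
    ∀ (n t : Nat), j + 1 - t ≤ n → (∀ t', t' < t → EA s.reverse (s.length - 1 - j) t') →
    ZP s.reverse (s.length - 1 - j) (suffGo s j t) := by
  intro n
  induction n with
  | zero =>
    intro t hn hfwd
    rw [suffGo, if_neg (by rintro ⟨h, -⟩; omega)]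
    refine ⟨hfwd, ?_⟩
    intro hEA
    rw [← suff_cond_iff s j t hj] at hEA
    omega
  | succ n ih =>
    intro t hn hfwd
    rw [suffGo]
    by_cases hc : t ≤ j ∧ s[j - t]? = s[s.length - 1 - t]?
    · rw [if_pos hc]
      have htj : t ≤ j := hc.1
      exact ih (t + 1) (by omega)
        (fun t' ht' => by
          by_cases he : t' = t
          · subst he; exact (suff_cond_iff s j t' hj).1 hc
          · exact hfwd t' (by omega))
    · rw [if_neg hc]
      refine ⟨hfwd, ?_⟩
      intro hEA
      exact hc ((suff_cond_iff s j t hj).2 hEA)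

theorem suffGo_eq_zf (s : List Char) (j : Nat) (hj : j + 2 ≤ s.length) :
    suffGo s j 0 = zf s.reverse (s.length - 1 - j) :=
  (zf_eq_of_ZP (suffGo_ZP s j hj (j + 1) 0 (by omega) (fun t' ht' => by omega))).symm
-- ===== VERDICT (by name: the statement is the Claim_ definition above) =====
theorem good_suffix_table_spec : Claim_equal_good_suffix_table := by
  unfold Claim_equal_good_suffix_table
  intro S _
  unfold Spec_good_suffix_table good_suffix_table good_suffix_table_alt
  simp only
  rw [List.map_const']
  apply PySem.List.foldl_congr_mem
  intro acc j hj
  rw [PySem.List.mem_pyRange_one] at hj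
  obtain ⟨hj0, hjm⟩ := hj
  have hm2 : 2 ≤ S.toList.length := by omega
  have hjN : j.toNat + 2 ≤ S.toList.length := by omega
  obtain ⟨hfl, hfk⟩ := fp_correct S.toList.reverse
  have hrevl : S.toList.reverse.length = S.toList.length := by simp
  have hNj : PySem.List.pyGet? ((fundamentalPreprocess S.toList.reverse).reverse) j =
      some ((zf S.toList.reverse (S.toList.length - 1 - j.toNat) : Int)) := by
    rw [PySem.List.pyGet?_of_nonneg _ hj0,
      List.getElem?_reverse (by rw [hfl, hrevl]; omega), hfl, hrevl]
    exact hfk (S.toList.length - 1 - j.toNat) (by omega) (by omega)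
  rw [hNj, suffGo_eq_zf S.toList j.toNat hjN]
  rfl
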